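-- pv_equiv track=rewrite | github.com/mtimkovich/maxtimkovich.com | src/friendbot/friendbot.py | emotifier
-- ===== SOURCE A (Python) =====
-- characters = {
--     ' ': '-----',
--     '.': '00001',
--     '!': '11101',
--     'a': '75755',
--     'b': '75757',
--     'c': '71117',
--     'd': '35553',
--     'e': '71717',
--     'f': '71711',
--     'g': '71757',
--     'h': '55755',
--     'i': '72227',
--     'j': '44457',
--     'k': '55355',
--     'l': '11117',
--     'm': '57555',
--     'n': '75555',
--     'o': '75557',
--     'p': '75711',
--     'q': '75744',
--     'r': '75355',
--     's': '71747',
--     't': '72222',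
--     'u': '55557',
--     'v': '55552',
--     'w': '55575',
--     'x': '55255',
--     'y': '55222',
--     'z': '74717',
-- }
--
-- display = {
--     '7': 'ccc',
--     '5': 'c c',
--     '4': '  c',
--     '3': 'cc ',
--     '2': ' c ',
--     '1': 'c  ',
--     '0': '   ',
-- }
--
-- def emotifier(emote, phrase):
--     output = ''
--     for i in range(5):
--         for c in phrase:
--             line = characters[c][i]
--
--             if line == '-':
--                 output += ':blank:'
--                 continue
--
--             line_out = display[line]
--
--             line_out = line_out.replace(' ', ':blank:')
--             line_out = line_out.replace('c', emote)
--
--             output += line_out + '    '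
--
--         output += '\n'
--
--     return output
-- ===== SOURCE B (Python) =====
-- FONT = {
--     ' ': '-----', '.': '00001', '!': '11101',
--     'a': '75755', 'b': '75757', 'c': '71117', 'd': '35553', 'e': '71717',
--     'f': '71711', 'g': '71757', 'h': '55755', 'i': '72227', 'j': '44457',
--     'k': '55355', 'l': '11117', 'm': '57555', 'n': '75555', 'o': '75557',
--     'p': '75711', 'q': '75744', 'r': '75355', 's': '71747', 't': '72222',
--     'u': '55557', 'v': '55552', 'w': '55575', 'x': '55255', 'y': '55222',
--     'z': '74717',
-- }
--
-- # each display digit as its three pixels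
-- CELLS = {
--     '7': ('c', 'c', 'c'), '5': ('c', ' ', 'c'), '4': (' ', ' ', 'c'),
--     '3': ('c', 'c', ' '), '2': (' ', 'c', ' '), '1': ('c', ' ', ' '),
--     '0': (' ', ' ', ' '),
-- }
--
--
-- def emotifier(emote, phrase):
--     def seg(d):
--         # render one display digit pixel by pixel, trailing cell gap included
--         return ''.join(emote if p == 'c' else ':blank:' for p in CELLS[d]) + '    '
--
--     # char-major: the 5-row block of every character, left to right
--     blocks = []
--     for c in phrase:
--         blocks.append([':blank:' if r == '-' else seg(r) for r in FONT[c]])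
--
--     # transpose: assemble each of the 5 rows from the blocks
--     rows = []
--     for i in range(5):
--         rows.append(''.join(b[i] for b in blocks))
--     return '\n'.join(rows) + '\n'
-- ===== Notes on version B (the rewrite author's own statement) =====
-- stated objective: alternative
-- what changed: B is char-major and pixel-based: it renders each display digit pixel by pixel (emote/':blank:' per pixel instead of A's two str.replace passes), builds the 5-row block of each character, transposes the blocks into rows and joins them with '\n', instead of A's row-major single string accumulator.
import Mathlib
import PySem

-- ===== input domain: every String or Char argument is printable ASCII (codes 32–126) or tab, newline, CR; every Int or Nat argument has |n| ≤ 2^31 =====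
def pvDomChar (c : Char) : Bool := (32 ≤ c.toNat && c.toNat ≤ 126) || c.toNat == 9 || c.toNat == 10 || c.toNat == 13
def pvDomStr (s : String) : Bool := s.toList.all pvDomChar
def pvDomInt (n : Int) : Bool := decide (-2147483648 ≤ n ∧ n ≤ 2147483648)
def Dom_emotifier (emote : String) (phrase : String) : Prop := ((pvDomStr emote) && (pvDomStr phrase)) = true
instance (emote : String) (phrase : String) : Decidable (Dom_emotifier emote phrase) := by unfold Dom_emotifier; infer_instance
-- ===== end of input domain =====

-- B is char-major and pixel-based: each display digit is rendered pixel by pixel (no replace),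
-- blocks are built per character and transposed into rows (objective: alternative decomposition).

-- ===== PORT A =====
-- the module-level tables of A's module; Python strings kept as List Char (the PySem Chars side).
def pvCharacters : PySem.Dict Char (List Char) := PySem.Dict.mk
  [(' ', ['-','-','-','-','-']), ('.', ['0','0','0','0','1']), ('!', ['1','1','1','0','1']),
   ('a', ['7','5','7','5','5']), ('b', ['7','5','7','5','7']), ('c', ['7','1','1','1','7']),
   ('d', ['3','5','5','5','3']), ('e', ['7','1','7','1','7']), ('f', ['7','1','7','1','1']),
   ('g', ['7','1','7','5','7']), ('h', ['5','5','7','5','5']), ('i', ['7','2','2','2','7']),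
   ('j', ['4','4','4','5','7']), ('k', ['5','5','3','5','5']), ('l', ['1','1','1','1','7']),
   ('m', ['5','7','5','5','5']), ('n', ['7','5','5','5','5']), ('o', ['7','5','5','5','7']),
   ('p', ['7','5','7','1','1']), ('q', ['7','5','7','4','4']), ('r', ['7','5','3','5','5']),
   ('s', ['7','1','7','4','7']), ('t', ['7','2','2','2','2']), ('u', ['5','5','5','5','7']),
   ('v', ['5','5','5','5','2']), ('w', ['5','5','5','7','5']), ('x', ['5','5','2','5','5']),
   ('y', ['5','5','2','2','2']), ('z', ['7','4','7','1','7'])]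

def pvDisplay : PySem.Dict Char (List Char) := PySem.Dict.mk
  [('7', ['c','c','c']), ('5', ['c',' ','c']), ('4', [' ',' ','c']),
   ('3', ['c','c',' ']), ('2', [' ','c',' ']), ('1', ['c',' ',' ']), ('0', [' ',' ',' '])]

-- ':blank:' and the four-space cell gap as char lists
def pvBlank : List Char := [':','b','l','a','n','k',':']
def pvGap : List Char := [' ',' ',' ',' ']

-- literal transliteration of A: one accumulator, outer loop over range(5), inner loop over phrase.
-- characters[c] / display[line] raise KeyError where get? = none (excluded by Pre_); the none
-- branches leave the accumulator unchanged and are unreachable under Pre_.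
def emotifier (emote : String) (phrase : String) : String :=
  String.ofList
    ((PySem.List.pyRange 0 5 1).foldl (fun output i =>
      (phrase.toList.foldl (fun out c =>
        match pvCharacters.get? c with
        | none => out
        | some code =>
          match PySem.List.pyGet? code i with
          | none => out
          | some line =>
            if line = '-' then out ++ pvBlank
            else
              match pvDisplay.get? line with
              | none => out
              | some lineOut =>
                out ++ (PySem.Chars.replace (PySem.Chars.replace lineOut [' '] pvBlank)
                          ['c'] emote.toList ++ pvGap)) output) ++ ['\n']) [])

-- ===== PORT B =====
-- B's FONT table (same data as A's `characters`, kept as Python strings)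
def bFont : PySem.Dict Char String := PySem.Dict.mk
  [(' ', "-----"), ('.', "00001"), ('!', "11101"),
   ('a', "75755"), ('b', "75757"), ('c', "71117"), ('d', "35553"), ('e', "71717"),
   ('f', "71711"), ('g', "71757"), ('h', "55755"), ('i', "72227"), ('j', "44457"),
   ('k', "55355"), ('l', "11117"), ('m', "57555"), ('n', "75555"), ('o', "75557"),
   ('p', "75711"), ('q', "75744"), ('r', "75355"), ('s', "71747"), ('t', "72222"),
   ('u', "55557"), ('v', "55552"), ('w', "55575"), ('x', "55255"), ('y', "55222"),
   ('z', "74717")]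

-- B's CELLS table: each display digit as its three pixels
def bCells : PySem.Dict Char (Char × Char × Char) := PySem.Dict.mk
  [('7', ('c', 'c', 'c')), ('5', ('c', ' ', 'c')), ('4', (' ', ' ', 'c')),
   ('3', ('c', 'c', ' ')), ('2', (' ', 'c', ' ')), ('1', ('c', ' ', ' ')),
   ('0', (' ', ' ', ' '))]

-- one pixel: the emote or ':blank:'
def bPix (emote : String) (p : Char) : List Char :=
  if p = 'c' then emote.toList else ":blank:".toList

-- seg(d): one display digit pixel by pixel, trailing cell gap included
-- (KeyError on a digit outside CELLS → [] here; unreachable, the font uses only known digits)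
def bSeg (emote : String) (d : Char) : List Char :=
  match bCells.get? d with
  | none => []
  | some (p, q, r) => bPix emote p ++ bPix emote q ++ bPix emote r ++ "    ".toList

-- the 5-row block of one character (KeyError on FONT[c] → empty block, excluded by Pre_)
def bBlock (emote : String) (c : Char) : List (List Char) :=
  (match bFont.get? c with | none => "" | some s => s).toList.map
    (fun r => if r = '-' then ":blank:".toList else bSeg emote r)

def emotifier_alt (emote : String) (phrase : String) : String :=
  let blocks := phrase.toList.map (bBlock emote)
  String.ofList
    (List.intercalate ['\n'] ((List.range 5).map (fun i =>
      (blocks.map (fun b => b.getD i [])).flatten)) ++ ['\n'])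

-- ===== PRECONDITION & SPEC =====
-- Pre_ excludes exactly the phrases containing a character outside the 29-key font table, on
-- which the Python A raises KeyError (and B raises KeyError too).
def Pre_emotifier (emote : String) (phrase : String) : Prop :=
  (phrase.toList.all (fun c => c ∈ [' ', '.', '!', 'a', 'b', 'c', 'd', 'e', 'f', 'g', 'h', 'i',
    'j', 'k', 'l', 'm', 'n', 'o', 'p', 'q', 'r', 's', 't', 'u', 'v', 'w', 'x', 'y', 'z'])) = true
instance (emote : String) (phrase : String) : Decidable (Pre_emotifier emote phrase) := by
  unfold Pre_emotifier; infer_instance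

def pvWitness_emotifier : String × String := ("x", "hi !")

def Spec_emotifier (emote : String) (phrase : String) (out : String) : Prop := out = emotifier_alt emote phrase
instance (emote : String) (phrase : String) (out : String) : Decidable (Spec_emotifier emote phrase out) := by unfold Spec_emotifier; infer_instance

-- ===== CLAIM (what is proved, stated in full; the proofs are below) =====
def Claim_equal_emotifier : Prop := ∀ (emote : String) (phrase : String), Dom_emotifier emote phrase → Pre_emotifier emote phrase → Spec_emotifier emote phrase (emotifier emote phrase)

-- ===== LEMMAS AND PROOFS =====

-- the chunk A's inner loop appends for character c in row i
def pvCell (emote : String) (c : Char) (i : Int) : List Char :=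
  match pvCharacters.get? c with
  | none => []
  | some code =>
    match PySem.List.pyGet? code i with
    | none => []
    | some line =>
      if line = '-' then pvBlank
      else
        match pvDisplay.get? line with
        | none => []
        | some lineOut =>
          PySem.Chars.replace (PySem.Chars.replace lineOut [' '] pvBlank) ['c'] emote.toList ++ pvGap

-- A's inner loop appends pvCell for every character
lemma pv_inner (emote : String) (i : Int) (cs : List Char) (acc : List Char) :
    cs.foldl (fun out c =>
        match pvCharacters.get? c with
        | none => out
        | some code =>
          match PySem.List.pyGet? code i with
          | none => out
          | some line =>
            if line = '-' then out ++ pvBlank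
            else
              match pvDisplay.get? line with
              | none => out
              | some lineOut =>
                out ++ (PySem.Chars.replace (PySem.Chars.replace lineOut [' '] pvBlank)
                          ['c'] emote.toList ++ pvGap)) acc
      = acc ++ (cs.map (fun c => pvCell emote c i)).flatten := by
  induction cs generalizing acc with
  | nil => simp
  | cons c cs ih =>
    have hstep : ∀ (acc : List Char),
        (match pvCharacters.get? c with
          | none => acc
          | some code =>
            match PySem.List.pyGet? code i with
            | none => acc
            | some line =>
              if line = '-' then acc ++ pvBlank
              else
                match pvDisplay.get? line with
                | none => acc
                | some lineOut =>
                  acc ++ (PySem.Chars.replace (PySem.Chars.replace lineOut [' '] pvBlank)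
                            ['c'] emote.toList ++ pvGap))
          = acc ++ pvCell emote c i := by
      intro acc
      unfold pvCell
      cases h1 : pvCharacters.get? c with
      | none => simp
      | some code =>
        simp only [h1]
        cases h2 : PySem.List.pyGet? code i with
        | none => simp
        | some line =>
          simp only [h2]
          by_cases h : line = '-'
          · simp [h]
          · cases h3 : pvDisplay.get? line <;> simp [h]
    simp only [List.foldl_cons, List.map_cons, List.flatten_cons, hstep, ih, List.append_assoc]

-- B's per-pixel rendering of a digit equals A's replace-based rendering of its display code
lemma pv_seg_eq (emote : String) (d : Char) (v : List Char) (h : pvDisplay.get? d = some v) :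
    bSeg emote d
      = PySem.Chars.replace (PySem.Chars.replace v [' '] pvBlank) ['c'] emote.toList ++ pvGap := by
  have hd : d ∈ ['7', '5', '4', '3', '2', '1', '0'] := by
    by_contra hnot
    simp only [List.mem_cons, List.not_mem_nil, or_false, not_or] at hnot
    obtain ⟨n7, n5, n4, n3, n2, n1, n0⟩ := hnot
    simp [pvDisplay, PySem.Dict.get?_mk_cons, beq_iff_eq, Ne.symm n7, Ne.symm n5, Ne.symm n4,
      Ne.symm n3, Ne.symm n2, Ne.symm n1, Ne.symm n0, PySem.Dict.get?] at h
  fin_cases hd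
  · obtain rfl := Option.some.inj (show some (['c','c','c'] : List Char) = some v from h)
    show bPix emote 'c' ++ bPix emote 'c' ++ bPix emote 'c' ++ "    ".toList = _
    simp [bPix, pvBlank, pvGap, PySem.Chars.replace, PySem.Chars.replace.go]
  · obtain rfl := Option.some.inj (show some (['c',' ','c'] : List Char) = some v from h)
    show bPix emote 'c' ++ bPix emote ' ' ++ bPix emote 'c' ++ "    ".toList = _
    simp [bPix, pvBlank, pvGap, PySem.Chars.replace, PySem.Chars.replace.go]
  · obtain rfl := Option.some.inj (show some ([' ',' ','c'] : List Char) = some v from h)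
    show bPix emote ' ' ++ bPix emote ' ' ++ bPix emote 'c' ++ "    ".toList = _
    simp [bPix, pvBlank, pvGap, PySem.Chars.replace, PySem.Chars.replace.go]
  · obtain rfl := Option.some.inj (show some (['c','c',' '] : List Char) = some v from h)
    show bPix emote 'c' ++ bPix emote 'c' ++ bPix emote ' ' ++ "    ".toList = _
    simp [bPix, pvBlank, pvGap, PySem.Chars.replace, PySem.Chars.replace.go]
  · obtain rfl := Option.some.inj (show some ([' ','c',' '] : List Char) = some v from h)
    show bPix emote ' ' ++ bPix emote 'c' ++ bPix emote ' ' ++ "    ".toList = _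
    simp [bPix, pvBlank, pvGap, PySem.Chars.replace, PySem.Chars.replace.go]
  · obtain rfl := Option.some.inj (show some (['c',' ',' '] : List Char) = some v from h)
    show bPix emote 'c' ++ bPix emote ' ' ++ bPix emote ' ' ++ "    ".toList = _
    simp [bPix, pvBlank, pvGap, PySem.Chars.replace, PySem.Chars.replace.go]
  · obtain rfl := Option.some.inj (show some ([' ',' ',' '] : List Char) = some v from h)
    show bPix emote ' ' ++ bPix emote ' ' ++ bPix emote ' ' ++ "    ".toList = _
    simp [bPix, pvBlank, pvGap, PySem.Chars.replace, PySem.Chars.replace.go]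

-- every font character maps to a 5-row code whose non-dash rows are display keys,
-- and B's FONT agrees with A's characters table
lemma pv_table : ∀ c ∈ [' ', '.', '!', 'a', 'b', 'c', 'd', 'e', 'f', 'g', 'h', 'i', 'j', 'k',
    'l', 'm', 'n', 'o', 'p', 'q', 'r', 's', 't', 'u', 'v', 'w', 'x', 'y', 'z'],
    ∃ s : String, bFont.get? c = some s ∧ pvCharacters.get? c = some s.toList ∧
      s.toList.length = 5 ∧ ∀ r ∈ s.toList, r ∈ ['-', '7', '5', '4', '3', '2', '1', '0'] := by
  intro c hc
  fin_cases hc <;>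
    exact ⟨_, rfl, by simp [pvCharacters, PySem.Dict.get?_mk_cons], by simp, by simp⟩

-- every display digit is a display key
lemma pv_digit (r : Char) (h : r ∈ ['-', '7', '5', '4', '3', '2', '1', '0']) :
    r = '-' ∨ (pvDisplay.get? r).isSome = true := by
  fin_cases h
  · exact Or.inl rfl
  all_goals exact Or.inr rfl

-- pointwise: row k of B's block for a font character is A's cell
lemma pv_getD_block (emote : String) (c : Char)
    (h : c ∈ [' ', '.', '!', 'a', 'b', 'c', 'd', 'e', 'f', 'g', 'h', 'i', 'j', 'k', 'l', 'm',
      'n', 'o', 'p', 'q', 'r', 's', 't', 'u', 'v', 'w', 'x', 'y', 'z'])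
    (k : Nat) (hk : k < 5) :
    (bBlock emote c).getD k [] = pvCell emote c (k : Int) := by
  obtain ⟨s, hb, ha, hlen, hrows⟩ := pv_table c h
  unfold bBlock pvCell
  rw [hb, ha]
  have hk' : k < s.toList.length := by omega
  rw [List.getD_eq_getElem _ _ (by simpa using hk'), List.getElem_map]
  simp only [PySem.List.pyGet?_natCast, List.getElem?_eq_getElem hk']
  by_cases hdash : s.toList[k] = '-'
  · simp [hdash, pvBlank]
  · simp only [hdash, if_false]
    cases hd : pvDisplay.get? s.toList[k] with
    | none =>
      exfalso
      rcases pv_digit s.toList[k] (hrows s.toList[k] (List.getElem_mem hk')) with h1 | h1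
      · exact hdash h1
      · rw [hd] at h1; simp at h1
    | some v => exact pv_seg_eq emote _ v hd

-- ===== VERDICT =====
theorem emotifier_spec : Claim_equal_emotifier := by
  intro emote phrase _hdom hpre
  have hpre' : ∀ c ∈ phrase.toList, c ∈ [' ', '.', '!', 'a', 'b', 'c', 'd', 'e', 'f', 'g', 'h',
      'i', 'j', 'k', 'l', 'm', 'n', 'o', 'p', 'q', 'r', 's', 't', 'u', 'v', 'w', 'x', 'y', 'z'] := by
    simpa [Pre_emotifier, List.all_eq_true] using hpre
  unfold Spec_emotifier emotifier emotifier_alt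
  have h5 : PySem.List.pyRange 0 5 1
      = [((0:Nat):Int), ((1:Nat):Int), ((2:Nat):Int), ((3:Nat):Int), ((4:Nat):Int)] := by decide
  rw [h5]
  simp only [List.foldl_cons, List.foldl_nil, pv_inner, List.nil_append, List.append_assoc]
  have row : ∀ (k : Nat), k < 5 →
      (phrase.toList.map (bBlock emote)).map (fun b => b.getD k [])
        = phrase.toList.map (fun c => pvCell emote c (k : Int)) := by
    intro k hk
    rw [List.map_map]
    exact List.map_congr_left (fun c hc => pv_getD_block emote c (hpre' c hc) k hk)
  have hr : List.range 5 = [0, 1, 2, 3, 4] := by decide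
  rw [hr]
  simp only [List.map_cons, List.map_nil, row 0 (by omega), row 1 (by omega), row 2 (by omega),
    row 3 (by omega), row 4 (by omega), List.intercalate]
  simp [List.intersperse, List.append_assoc]
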